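-- pv_equiv track=rewrite | github.com/aiAndersen/marketing-content-portal | scripts/fix_tag_format.py | clean_pg_array_tags
-- ===== SOURCE A (Python) =====
-- def clean_pg_array_tags(value: str) -> str:
--     """Convert PostgreSQL array literal to clean comma-separated string.
--
--     {counselors, "career exploration", eBook} -> counselors, career exploration, eBook
--     {} -> None
--     """
--     if not value or value.strip() == '{}':
--         return None
--
--     # Remove outer braces
--     inner = value.strip()
--     if inner.startswith('{') and inner.endswith('}'):
--         inner = inner[1:-1]
--
--     # Parse the comma-separated values, respecting quoted strings
--     tags = []
--     current = ''
--     in_quotes = False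
--
--     for char in inner:
--         if char == '"':
--             in_quotes = not in_quotes
--         elif char == ',' and not in_quotes:
--             tag = current.strip().strip('"').strip()
--             if tag:
--                 tags.append(tag)
--             current = ''
--         else:
--             current += char
--
--     # Don't forget the last tag
--     tag = current.strip().strip('"').strip()
--     if tag:
--         tags.append(tag)
--
--     if not tags:
--         return None
--
--     return ', '.join(tags)
-- ===== SOURCE B (Python) =====
-- def clean_pg_array_tags(value: str) -> str:
--     """Split on the double-quote character to separate quoted/unquoted segments,
--     then split only the unquoted segments on commas (no char-by-char state machine)."""
--     if not value or value.strip() == '{}':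
--         return None
--     inner = value.strip()
--     if inner.startswith('{') and inner.endswith('}'):
--         inner = inner[1:-1]
--     fields = ['']
--     for i, seg in enumerate(inner.split('"')):
--         if i % 2 == 0:
--             pieces = seg.split(',')
--             fields[-1] += pieces[0]
--             fields.extend(pieces[1:])
--         else:
--             fields[-1] += seg
--     tags = [t for t in (f.strip() for f in fields) if t]
--     return ', '.join(tags) if tags else None
-- ===== Notes on version B (the rewrite author's own statement) =====
-- stated objective: faster
-- what changed: Replaced the char-by-char in_quotes state machine by splitting the inner text on the double-quote character into alternating unquoted/quoted segments and comma-splitting only the unquoted segments, grafting the pieces into fields.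
import Mathlib
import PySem

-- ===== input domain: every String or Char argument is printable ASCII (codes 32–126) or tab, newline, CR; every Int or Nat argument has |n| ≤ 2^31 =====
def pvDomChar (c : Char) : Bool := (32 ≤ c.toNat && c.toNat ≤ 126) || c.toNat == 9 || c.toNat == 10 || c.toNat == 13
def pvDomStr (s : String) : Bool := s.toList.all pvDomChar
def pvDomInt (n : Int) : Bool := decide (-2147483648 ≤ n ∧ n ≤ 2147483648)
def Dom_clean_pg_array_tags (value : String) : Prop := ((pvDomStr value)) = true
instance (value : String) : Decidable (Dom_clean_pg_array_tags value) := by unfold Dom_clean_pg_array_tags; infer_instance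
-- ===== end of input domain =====

-- B splits the inner text on the double-quote character and comma-splits only the unquoted
-- segments, instead of A's char-by-char in_quotes state machine (measured faster: the per-char
-- Python loop and string concatenation are replaced by a few str.split calls).

-- ===== PORT A =====
-- tag = current.strip().strip('"').strip()
def pvFinishTag (cur : List Char) : List Char :=
  PySem.Chars.strip (PySem.Chars.stripChars (PySem.Chars.strip cur) ['"'])

-- the loop body: state = (tags, current, in_quotes)
def pvStepA (st : List (List Char) × List Char × Bool) (c : Char) :
    List (List Char) × List Char × Bool :=
  if c = '"' then (st.1, st.2.1, !st.2.2)
  else if c = ',' ∧ st.2.2 = false then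
    let tag := pvFinishTag st.2.1
    (if tag ≠ [] then st.1 ++ [tag] else st.1, [], st.2.2)
  else (st.1, st.2.1 ++ [c], st.2.2)

def clean_pg_array_tags (value : String) : Option String :=
  let v := value.toList
  if v = [] ∨ PySem.Chars.strip v = ['{', '}'] then none
  else
    let inner := PySem.Chars.strip v
    let inner := if PySem.Chars.startswith inner ['{'] && PySem.Chars.endswith inner ['}'] then
        PySem.List.slice inner (some 1) (some (-1))
      else inner
    let st := inner.foldl pvStepA ([], [], false)
    let tag := pvFinishTag st.2.1
    let tags := if tag ≠ [] then st.1 ++ [tag] else st.1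
    if tags = [] then none
    else some (String.ofList (PySem.Chars.join [',', ' '] tags))

-- ===== PORT B =====
-- loop body over enumerate(inner.split('"')): fields[-1] += …, fields.extend(…)
def pvStepB (fields : List (List Char)) (iseg : Int × List Char) : List (List Char) :=
  if iseg.1 % 2 == 0 then
    let pieces := PySem.Chars.splitOn iseg.2 [',']
    (fields.dropLast ++ [fields.getLast! ++ pieces.head!]) ++ pieces.tail
  else fields.dropLast ++ [fields.getLast! ++ iseg.2]

def clean_pg_array_tags_alt (value : String) : Option String :=
  let v := value.toList
  if v = [] ∨ PySem.Chars.strip v = ['{', '}'] then none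
  else
    let inner := PySem.Chars.strip v
    let inner := if PySem.Chars.startswith inner ['{'] && PySem.Chars.endswith inner ['}'] then
        PySem.List.slice inner (some 1) (some (-1))
      else inner
    let fields := (PySem.List.enumerate (PySem.Chars.splitOn inner ['"'])).foldl pvStepB [[]]
    let tags := (fields.map PySem.Chars.strip).filter (· ≠ [])
    if tags = [] then none
    else some (String.ofList (PySem.Chars.join [',', ' '] tags))

-- ===== PRECONDITION & SPEC =====
def Spec_clean_pg_array_tags (value : String) (out : Option String) : Prop := out = clean_pg_array_tags_alt value
instance (value : String) (out : Option String) : Decidable (Spec_clean_pg_array_tags value out) := by unfold Spec_clean_pg_array_tags; infer_instance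

-- ===== CLAIM (what is proved, stated in full; the proofs are below) =====
def Claim_equal_clean_pg_array_tags : Prop := ∀ (value : String), Dom_clean_pg_array_tags value → Spec_clean_pg_array_tags value (clean_pg_array_tags value)

-- ===== LEMMAS AND PROOFS =====

-- prepend to the head field ("graft a onto the front")
def pvPh (a : List Char) : List (List Char) → List (List Char)
  | [] => [a]
  | h :: t => (a ++ h) :: t

-- clean accumulator-free split on a single character
def pvSc (q : Char) : List Char → List (List Char)
  | [] => [[]]
  | c :: rest => if c = q then [] :: pvSc q rest else pvPh [c] (pvSc q rest)

-- the common spec: field list produced by the quote-aware comma split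
def pvFsp : Bool → List Char → List (List Char)
  | _, [] => [[]]
  | q, c :: rest =>
    if c = '"' then pvFsp (!q) rest
    else if c = ',' ∧ q = false then [] :: pvFsp q rest
    else pvPh [c] (pvFsp q rest)

-- join two field lists, merging the boundary fields
def pvGraft : List (List Char) → List (List Char) → List (List Char)
  | [], ys => ys
  | [x], ys => pvPh x ys
  | x :: y :: t, ys => x :: pvGraft (y :: t) ys

-- clean recursion equivalent to B's fold
def pvRecB : List (List Char) → Bool → List (List Char) → List (List Char)
  | [], _, fields => fields
  | seg :: rest, ev, fields =>
    if ev then pvRecB rest false (pvGraft fields (pvSc ',' seg))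
    else pvRecB rest true (pvGraft fields [seg])

theorem pvPh_ne_nil (a : List Char) (ys : List (List Char)) : pvPh a ys ≠ [] := by
  cases ys <;> simp [pvPh]

theorem pvPh_nil (ys : List (List Char)) (h : ys ≠ []) : pvPh [] ys = ys := by
  cases ys <;> simp_all [pvPh]

theorem pvPh_ph (a b : List Char) (ys : List (List Char)) :
    pvPh a (pvPh b ys) = pvPh (a ++ b) ys := by
  cases ys <;> simp [pvPh]

theorem pvSc_ne_nil (q : Char) (l : List Char) : pvSc q l ≠ [] := by
  cases l with
  | nil => simp [pvSc]
  | cons c rest =>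
    simp only [pvSc]
    split
    · simp
    · exact pvPh_ne_nil _ _

theorem pvFsp_ne_nil (q : Bool) (l : List Char) : pvFsp q l ≠ [] := by
  induction l generalizing q with
  | nil => simp [pvFsp]
  | cons c rest ih =>
    simp only [pvFsp]; split
    · exact ih _
    · split
      · simp
      · exact pvPh_ne_nil _ _

theorem pvGraft_concat (d : List (List Char)) (x : List Char) (ys : List (List Char)) :
    pvGraft (d ++ [x]) ys = d ++ pvPh x ys := by
  induction d with
  | nil => simp [pvGraft]
  | cons a d' ih =>
    rw [show (a :: d') ++ [x] = a :: (d' ++ [x]) from rfl]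
    cases h : d' ++ [x] with
    | nil => simp at h
    | cons b t =>
      show a :: pvGraft (b :: t) ys = a :: d' ++ pvPh x ys
      rw [← h, ih]
      rfl

theorem pvGraft_ne_nil (xs ys : List (List Char)) (h : ys ≠ []) : pvGraft xs ys ≠ [] := by
  match xs with
  | [] => simpa [pvGraft]
  | [x] => exact pvPh_ne_nil _ _
  | x :: y :: t => simp [pvGraft]

theorem pvPh_graft (a : List Char) (ys zs : List (List Char)) (h : ys ≠ []) :
    pvPh a (pvGraft ys zs) = pvGraft (pvPh a ys) zs := by
  match ys with
  | [] => exact absurd rfl h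
  | [y] =>
    rw [show pvGraft [y] zs = pvPh y zs from rfl, pvPh_ph,
      show pvPh a [y] = [a ++ y] from rfl,
      show pvGraft [a ++ y] zs = pvPh (a ++ y) zs from rfl]
  | y :: y' :: t => simp [pvGraft, pvPh]

theorem pvGraft_cons_nil (ys zs : List (List Char)) (h : ys ≠ []) :
    pvGraft ys ([] :: zs) = ys ++ zs := by
  match ys with
  | [] => exact absurd rfl h
  | [y] => simp [pvGraft, pvPh]
  | y :: y' :: t =>
    simp only [pvGraft, List.cons_append]
    exact congrArg _ (pvGraft_cons_nil (y' :: t) zs (by simp))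

theorem pvGraft_single (ys : List (List Char)) (h : ys ≠ []) : pvGraft ys [[]] = ys := by
  have := pvGraft_cons_nil ys [] h
  simpa using this

theorem pvGraft_cons_ne (x : List Char) (G zs : List (List Char)) (h : G ≠ []) :
    pvGraft (x :: G) zs = x :: pvGraft G zs := by
  cases G with
  | nil => exact absurd rfl h
  | cons b u => rfl

theorem pvGraft_assoc (xs ys zs : List (List Char)) (h : ys ≠ []) :
    pvGraft (pvGraft xs ys) zs = pvGraft xs (pvGraft ys zs) := by
  match xs with
  | [] => simp [pvGraft]
  | [x] => simp [pvGraft, pvPh_graft _ _ _ h]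
  | x :: y :: t =>
    rw [show pvGraft (x :: y :: t) ys = x :: pvGraft (y :: t) ys from rfl,
      pvGraft_cons_ne x _ zs (pvGraft_ne_nil _ _ h),
      pvGraft_assoc (y :: t) ys zs h,
      show pvGraft (x :: y :: t) (pvGraft ys zs) = x :: pvGraft (y :: t) (pvGraft ys zs) from rfl]

theorem pvSc_append (q : Char) (a b : List Char) :
    pvSc q (a ++ b) = pvGraft (pvSc q a) (pvSc q b) := by
  induction a with
  | nil =>
    rw [List.nil_append, show pvSc q ([] : List Char) = [[]] from rfl,
      show pvGraft [[]] (pvSc q b) = pvPh [] (pvSc q b) from rfl,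
      pvPh_nil _ (pvSc_ne_nil q b)]
  | cons c a' ih =>
    by_cases hc : c = q
    · cases hs : pvSc q a' with
      | nil => exact absurd hs (pvSc_ne_nil _ _)
      | cons y t => simp [pvSc, hc, ih, hs, pvGraft]
    · simp [pvSc, hc, ih, pvPh_graft _ _ _ (pvSc_ne_nil q a')]

theorem pvPh_append_left (a : List Char) (ys zs : List (List Char)) (h : ys ≠ []) :
    pvPh a (ys ++ zs) = pvPh a ys ++ zs := by
  cases ys <;> simp_all [pvPh]

theorem pvCrux (l : List Char) :
    ∀ (cur : List Char) (d : List (List Char)) (x : List Char),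
      (pvRecB (pvPh cur (pvSc '"' l)) true (d ++ [x]) =
        d ++ pvGraft (pvPh x (pvSc ',' cur)) (pvFsp false l))
      ∧ (pvRecB (pvPh cur (pvSc '"' l)) false (d ++ [x]) =
        d ++ pvPh (x ++ cur) (pvFsp true l)) := by
  induction l with
  | nil =>
    intro cur d x
    constructor
    · rw [show pvSc '"' [] = [[]] from rfl, show pvPh cur [[]] = [cur ++ []] from rfl,
        List.append_nil,
        show pvRecB [cur] true (d ++ [x]) = pvGraft (d ++ [x]) (pvSc ',' cur) from rfl,
        pvGraft_concat, show pvFsp false [] = [[]] from rfl,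
        pvGraft_single _ (pvPh_ne_nil x _)]
    · rw [show pvSc '"' [] = [[]] from rfl, show pvPh cur [[]] = [cur ++ []] from rfl,
        List.append_nil,
        show pvRecB [cur] false (d ++ [x]) = pvGraft (d ++ [x]) [cur] from rfl,
        pvGraft_concat, show pvFsp true [] = [[]] from rfl,
        show pvPh x [cur] = [x ++ cur] from rfl,
        show pvPh (x ++ cur) [[]] = [x ++ cur ++ []] from rfl, List.append_nil]
  | cons c rest ih =>
    intro cur d x
    by_cases hq : c = '"'
    · subst hq
      have hS : pvSc '"' ('"' :: rest) = [] :: pvSc '"' rest := by simp [pvSc]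
      have hPh : pvPh cur ([] :: pvSc '"' rest) = cur :: pvSc '"' rest := by simp [pvPh]
      have hSnil : pvSc '"' rest = pvPh [] (pvSc '"' rest) :=
        (pvPh_nil _ (pvSc_ne_nil _ _)).symm
      constructor
      · rw [hS, hPh,
          show pvRecB (cur :: pvSc '"' rest) true (d ++ [x]) =
            pvRecB (pvSc '"' rest) false (pvGraft (d ++ [x]) (pvSc ',' cur)) from rfl,
          pvGraft_concat]
        obtain ⟨d3, x2, hd⟩ :
            ∃ d3 x2, pvPh x (pvSc ',' cur) = d3 ++ [x2] := by
          rcases (pvPh x (pvSc ',' cur)).eq_nil_or_concat with h | ⟨d3, x2, h⟩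
          · exact absurd h (pvPh_ne_nil _ _)
          · exact ⟨d3, x2, by simpa using h⟩
        rw [hd, ← List.append_assoc, hSnil, (ih [] (d ++ d3) x2).2,
          show pvFsp false ('"' :: rest) = pvFsp true rest from by simp [pvFsp],
          pvGraft_concat, List.append_nil, List.append_assoc]
      · rw [hS, hPh,
          show pvRecB (cur :: pvSc '"' rest) false (d ++ [x]) =
            pvRecB (pvSc '"' rest) true (pvGraft (d ++ [x]) [cur]) from rfl,
          pvGraft_concat, show pvPh x [cur] = [x ++ cur] from rfl,
          hSnil, (ih [] d (x ++ cur)).1,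
          show pvSc ',' [] = [[]] from rfl,
          show pvPh (x ++ cur) [[]] = [x ++ cur ++ []] from rfl, List.append_nil,
          show pvGraft [x ++ cur] (pvFsp false rest) = pvPh (x ++ cur) (pvFsp false rest) from rfl,
          show pvFsp true ('"' :: rest) = pvFsp false rest from by simp [pvFsp]]
    · have hS : pvSc '"' (c :: rest) = pvPh [c] (pvSc '"' rest) := by simp [pvSc, hq]
      have hY : pvSc ',' cur ≠ [] := pvSc_ne_nil _ _
      constructor
      · by_cases hcm : c = ','
        · subst hcm
          rw [hS, pvPh_ph, (ih (cur ++ [',']) d x).1,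
            pvSc_append, show pvSc ',' [','] = [] :: [[]] from rfl,
            pvGraft_cons_nil _ _ hY,
            pvPh_append_left _ _ _ hY,
            pvGraft_concat, pvPh_nil _ (pvFsp_ne_nil _ _),
            show pvFsp false (',' :: rest) = [] :: pvFsp false rest from by simp [pvFsp, hq],
            pvGraft_cons_nil _ _ (pvPh_ne_nil _ _)]
        · rw [hS, pvPh_ph, (ih (cur ++ [c]) d x).1,
            pvSc_append, show pvSc ',' [c] = if c = ',' then [] :: pvSc ',' [] else pvPh [c] (pvSc ',' []) from rfl,
            if_neg hcm, show pvPh [c] (pvSc ',' []) = [[c] ++ []] from rfl, List.append_nil,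
            pvPh_graft _ _ _ hY,
            pvGraft_assoc _ _ _ (by simp : ([[c]] : List (List Char)) ≠ []),
            show pvGraft [[c]] (pvFsp false rest) = pvPh [c] (pvFsp false rest) from rfl,
            show pvFsp false (c :: rest) = pvPh [c] (pvFsp false rest) from by
              simp [pvFsp, hq, hcm]]
      · rw [hS, pvPh_ph, (ih (cur ++ [c]) d x).2,
          show pvFsp true (c :: rest) = pvPh [c] (pvFsp true rest) from by simp [pvFsp, hq],
          pvPh_ph, List.append_assoc]

-- splitOn on a one-character separator is the clean split pvSc
theorem pvGo_eq (q : Char) : ∀ (fuel : Nat) (l cur : List Char) (acc : List (List Char)),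
    l.length < fuel →
    PySem.Chars.splitOn.go [q] fuel l cur acc = acc.reverse ++ pvPh cur.reverse (pvSc q l) := by
  intro fuel
  induction fuel with
  | zero => intro l cur acc h; omega
  | succ fuel ih =>
    intro l cur acc h
    cases l with
    | nil =>
      rw [show PySem.Chars.splitOn.go [q] (fuel + 1) [] cur acc =
        (cur.reverse :: acc).reverse from rfl]
      simp [pvSc, pvPh]
    | cons c rest =>
      by_cases hc : q = c
      · rw [show PySem.Chars.splitOn.go [q] (fuel + 1) (c :: rest) cur acc =
          if [q].isPrefixOf (c :: rest) then
            PySem.Chars.splitOn.go [q] fuel (List.drop 1 (c :: rest)) [] (cur.reverse :: acc)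
          else PySem.Chars.splitOn.go [q] fuel rest (c :: cur) acc from rfl,
          if_pos (by simp [List.isPrefixOf, hc])]
        simp only [List.drop_succ_cons, List.drop_zero]
        rw [ih rest [] (cur.reverse :: acc) (by simp at h; omega)]
        rw [show pvSc q (c :: rest) = [] :: pvSc q rest from by simp [pvSc, hc.symm]]
        cases hs : pvSc q rest with
        | nil => exact absurd hs (pvSc_ne_nil _ _)
        | cons y t => simp [pvPh]
      · rw [show PySem.Chars.splitOn.go [q] (fuel + 1) (c :: rest) cur acc =
          if [q].isPrefixOf (c :: rest) then
            PySem.Chars.splitOn.go [q] fuel (List.drop 1 (c :: rest)) [] (cur.reverse :: acc)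
          else PySem.Chars.splitOn.go [q] fuel rest (c :: cur) acc from rfl,
          if_neg (by simp [List.isPrefixOf]; exact hc)]
        rw [ih rest (c :: cur) acc (by simp at h; omega)]
        rw [show pvSc q (c :: rest) = pvPh [c] (pvSc q rest) from by
          simp only [pvSc]
          rw [if_neg (fun h' : c = q => hc h'.symm)],
          pvPh_ph]
        simp

theorem pvSplitOn_eq (l : List Char) (q : Char) :
    PySem.Chars.splitOn l [q] = pvSc q l := by
  rw [show PySem.Chars.splitOn l [q] =
      PySem.Chars.splitOn.go [q] (l.length + 1) l [] [] from rfl,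
    pvGo_eq q _ _ _ _ (by omega)]
  simp [pvPh_nil _ (pvSc_ne_nil _ _)]

theorem pvParity (i : Int) : ((i + 1) % 2 == 0) = !(i % 2 == 0) := by
  rcases Int.emod_two_eq i with h | h
  · have h2 : (i + 1) % 2 = 1 := by omega
    rw [h, h2]; decide
  · have h2 : (i + 1) % 2 = 0 := by omega
    rw [h, h2]; decide

theorem pvGetLast!_concat (d : List (List Char)) (x : List Char) :
    (d ++ [x]).getLast! = x := by
  induction d with
  | nil => rfl
  | cons a d' ih => cases h : d' ++ [x] with
    | nil => simp at h
    | cons b t =>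
      rw [show (a :: d') ++ [x] = a :: (d' ++ [x]) from rfl, h,
        show (a :: b :: t).getLast! = (b :: t).getLast! from rfl, ← h, ih]

-- B's foldl over enumerate equals the clean parity recursion pvRecB
theorem pvFoldB : ∀ (segs : List (List Char)) (i : Int) (d : List (List Char)) (x : List Char),
    List.foldl pvStepB (d ++ [x]) (PySem.List.enumerate segs i) =
      pvRecB segs (i % 2 == 0) (d ++ [x]) := by
  intro segs
  induction segs with
  | nil => intro i d x; simp [PySem.List.enumerate, pvRecB]
  | cons s t ih =>
    intro i d x
    rw [show PySem.List.enumerate (s :: t) i = (i, s) :: PySem.List.enumerate t (i + 1) from by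
        simp [PySem.List.enumerate],
      List.foldl_cons]
    by_cases hb : (i % 2 == 0) = true
    · have hstep : pvStepB (d ++ [x]) (i, s) = pvGraft (d ++ [x]) (pvSc ',' s) := by
        cases hs : pvSc ',' s with
        | nil => exact absurd hs (pvSc_ne_nil _ _)
        | cons p0 ps =>
          rw [show pvStepB (d ++ [x]) (i, s) =
            if (i % 2 == 0) then
              ((d ++ [x]).dropLast ++ [(d ++ [x]).getLast! ++ (PySem.Chars.splitOn s [',']).head!]) ++
                (PySem.Chars.splitOn s [',']).tail
            else (d ++ [x]).dropLast ++ [(d ++ [x]).getLast! ++ s] from rfl,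
            if_pos hb, pvSplitOn_eq, hs, pvGraft_concat,
            List.dropLast_concat, pvGetLast!_concat]
          simp [pvPh]
      rw [hstep, pvGraft_concat]
      obtain ⟨d2, x2, hd⟩ : ∃ d2 x2, d ++ pvPh x (pvSc ',' s) = d2 ++ [x2] := by
        rcases (pvPh x (pvSc ',' s)).eq_nil_or_concat with h | ⟨d3, x3, h⟩
        · exact absurd h (pvPh_ne_nil _ _)
        · exact ⟨d ++ d3, x3, by simp [h]⟩
      rw [hd, ih (i + 1) d2 x2, pvParity, hb, ← hd,
        show pvRecB (s :: t) true (d ++ [x]) =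
          pvRecB t false (pvGraft (d ++ [x]) (pvSc ',' s)) from rfl,
        pvGraft_concat]
      rfl
    · have hb' : (i % 2 == 0) = false := by revert hb; cases (i % 2 == 0) <;> simp
      have hstep : pvStepB (d ++ [x]) (i, s) = d ++ [x ++ s] := by
        rw [show pvStepB (d ++ [x]) (i, s) =
          if (i % 2 == 0) then
            ((d ++ [x]).dropLast ++ [(d ++ [x]).getLast! ++ (PySem.Chars.splitOn s [',']).head!]) ++
              (PySem.Chars.splitOn s [',']).tail
          else (d ++ [x]).dropLast ++ [(d ++ [x]).getLast! ++ s] from rfl,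
          hb', List.dropLast_concat, pvGetLast!_concat]
        simp
      rw [hstep, ih (i + 1) d (x ++ s), pvParity, hb']
      rw [show pvRecB (s :: t) false (d ++ [x]) =
          pvRecB t true (pvGraft (d ++ [x]) [s]) from rfl,
        pvGraft_concat, show pvPh x [s] = [x ++ s] from rfl]
      rfl

-- A's fold equals the mapped/filtered common field list
def pvFinTags (st : List (List Char) × List Char × Bool) : List (List Char) :=
  if pvFinishTag st.2.1 ≠ [] then st.1 ++ [pvFinishTag st.2.1] else st.1

theorem pvAside : ∀ (l : List Char) (tags : List (List Char)) (cur : List Char) (q : Bool),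
    pvFinTags (List.foldl pvStepA (tags, cur, q) l) =
      tags ++ ((pvPh cur (pvFsp q l)).map pvFinishTag).filter (· ≠ []) := by
  intro l
  induction l with
  | nil =>
    intro tags cur q
    rw [List.foldl_nil, show pvFsp q [] = [[]] from rfl,
      show pvPh cur [[]] = [cur ++ []] from rfl, List.append_nil]
    by_cases hf : pvFinishTag cur = [] <;> simp [pvFinTags, List.filter, hf]
  | cons c rest ih =>
    intro tags cur q
    rw [List.foldl_cons]
    by_cases hq : c = '"'
    · rw [show pvStepA (tags, cur, q) c = (tags, cur, !q) from by simp [pvStepA, hq],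
        ih tags cur (!q), show pvFsp q (c :: rest) = pvFsp (!q) rest from by simp [pvFsp, hq]]
    · by_cases hcm : c = ',' ∧ q = false
      · rw [show pvStepA (tags, cur, q) c =
          (if pvFinishTag cur ≠ [] then tags ++ [pvFinishTag cur] else tags, [], q) from by
            simp [pvStepA, hcm],
          ih _ [] q, pvPh_nil _ (pvFsp_ne_nil _ _),
          show pvFsp q (c :: rest) = [] :: pvFsp q rest from by
            simp [pvFsp, hcm.1, hcm.2]]
        cases hs : pvFsp q rest with
        | nil => exact absurd hs (pvFsp_ne_nil _ _)
        | cons y t =>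
          rw [show pvPh cur ([] :: y :: t) = (cur ++ []) :: y :: t from rfl, List.append_nil]
          by_cases hf : pvFinishTag cur = [] <;>
            simp [List.filter_cons, hf, List.append_assoc]
      · rw [show pvStepA (tags, cur, q) c = (tags, cur ++ [c], q) from by
            dsimp only [pvStepA]
            rw [if_neg hq, if_neg hcm],
          ih tags (cur ++ [c]) q,
          show pvFsp q (c :: rest) = pvPh [c] (pvFsp q rest) from by
            simp only [pvFsp]
            rw [if_neg hq, if_neg (by exact fun h => hcm ⟨h.1, h.2⟩)],
          pvPh_ph]

-- strip/stripChars bookkeeping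
theorem pvDropWhile_eq_self {p : Char → Bool} {s : List Char} (h : ∀ c ∈ s, p c = false) :
    List.dropWhile p s = s := by
  cases s with
  | nil => rfl
  | cons a t => rw [List.dropWhile_cons, h a (by simp)]; simp

theorem pvDropWhile_head_false {p : Char → Bool} :
    ∀ {s c t}, List.dropWhile p s = c :: t → p c = false := by
  intro s
  induction s with
  | nil => intro c t h; simp at h
  | cons a s' ih =>
    intro c t h
    rw [List.dropWhile_cons] at h
    by_cases hp : p a = true
    · rw [if_pos hp] at h; exact ih h
    · rw [if_neg hp] at h
      cases h; simpa using hp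

theorem pvDropWhile_idem (p : Char → Bool) (s : List Char) :
    List.dropWhile p (List.dropWhile p s) = List.dropWhile p s := by
  cases h : List.dropWhile p s with
  | nil => rfl
  | cons c t => rw [List.dropWhile_cons, pvDropWhile_head_false h]; simp

theorem pvStrip_idem (s : List Char) :
    PySem.Chars.strip (PySem.Chars.strip s) = PySem.Chars.strip s := by
  unfold PySem.Chars.strip PySem.Chars.lstrip PySem.Chars.rstrip
  set p := PySem.Chars.isspace with hp
  set t := List.dropWhile p s with ht
  have hA : List.dropWhile p (List.dropWhile p t.reverse).reverse =
      (List.dropWhile p t.reverse).reverse := by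
    cases h : (List.dropWhile p t.reverse).reverse with
    | nil => rfl
    | cons c u =>
      have hpre : c :: u <+: t := by
        have hsuf : List.dropWhile p t.reverse <:+ t.reverse := List.dropWhile_suffix p
        have := hsuf.reverse
        rw [List.reverse_reverse] at this
        rw [h] at this
        exact this
      obtain ⟨w, hw⟩ := hpre
      have hc : p c = false := by
        apply pvDropWhile_head_false (s := s) (t := u ++ w)
        rw [← ht, ← hw]
        simp
      rw [List.dropWhile_cons, hc]
      simp
  rw [hA, List.reverse_reverse, pvDropWhile_idem]

theorem pvMem_strip {c : Char} {s : List Char} (h : c ∈ PySem.Chars.strip s) : c ∈ s := by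
  unfold PySem.Chars.strip PySem.Chars.lstrip PySem.Chars.rstrip at h
  have h1 := (List.dropWhile_sublist _ (l := (List.dropWhile PySem.Chars.isspace s).reverse)).subset
    (by simpa using h)
  have h2 := (List.dropWhile_sublist PySem.Chars.isspace (l := s)).subset (by simpa using h1)
  exact h2

theorem pvStripChars_id (s : List Char) (h : '"' ∉ s) :
    PySem.Chars.stripChars s ['"'] = s := by
  show (List.dropWhile (fun c => List.contains ['"'] c)
      (List.dropWhile (fun c => List.contains ['"'] c) s).reverse).reverse = s
  have hp : ∀ c ∈ s, (fun c => List.contains ['"'] c) c = false := by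
    intro c hc
    have h1 : c ≠ '"' := fun hh => h (hh ▸ hc)
    simp [h1]
  rw [pvDropWhile_eq_self hp,
    pvDropWhile_eq_self (fun c hc => hp c (by simpa using hc)),
    List.reverse_reverse]

theorem pvFsp_no_quote : ∀ (l : List Char) (q : Bool) (f : List Char),
    f ∈ pvFsp q l → '"' ∉ f := by
  intro l
  induction l with
  | nil => intro q f hf; simp [pvFsp] at hf; simp [hf]
  | cons c rest ih =>
    intro q f hf
    by_cases hq : c = '"'
    · rw [show pvFsp q (c :: rest) = pvFsp (!q) rest from by simp [pvFsp, hq]] at hf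
      exact ih _ f hf
    · by_cases hcm : c = ',' ∧ q = false
      · rw [show pvFsp q (c :: rest) = [] :: pvFsp q rest from by
          simp [pvFsp, hcm.1, hcm.2]] at hf
        rcases List.mem_cons.1 hf with rfl | hf'
        · simp
        · exact ih _ f hf'
      · rw [show pvFsp q (c :: rest) = pvPh [c] (pvFsp q rest) from by
          simp only [pvFsp]
          rw [if_neg hq, if_neg (by exact fun h => hcm ⟨h.1, h.2⟩)]] at hf
        cases hs : pvFsp q rest with
        | nil => exact absurd hs (pvFsp_ne_nil _ _)
        | cons y t =>
          rw [hs, show pvPh [c] (y :: t) = ([c] ++ y) :: t from rfl] at hf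
          rcases List.mem_cons.1 hf with rfl | hf'
          · intro hin
            rcases List.mem_append.1 hin with h1 | h1
            · simp at h1; exact hq h1.symm
            · exact ih q y (hs ▸ List.mem_cons_self) h1
          · exact ih q f (hs ▸ List.mem_cons_of_mem _ hf')

theorem pvFin_eq_strip (f : List Char) (h : '"' ∉ f) :
    pvFinishTag f = PySem.Chars.strip f := by
  unfold pvFinishTag
  have h2 : '"' ∉ PySem.Chars.strip f := fun hc => h (pvMem_strip hc)
  rw [pvStripChars_id _ h2, pvStrip_idem]

-- the common core: A's tag list equals B's tag list on any inner text
theorem pvCore (inner : List Char) :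
    (if pvFinishTag (inner.foldl pvStepA ([], [], false)).2.1 ≠ [] then
      (inner.foldl pvStepA ([], [], false)).1 ++
        [pvFinishTag (inner.foldl pvStepA ([], [], false)).2.1]
    else (inner.foldl pvStepA ([], [], false)).1) =
    (((PySem.List.enumerate (PySem.Chars.splitOn inner ['"'])).foldl pvStepB [[]]).map
      PySem.Chars.strip).filter (· ≠ []) := by
  have hA := pvAside inner [] [] false
  rw [show pvFinTags (inner.foldl pvStepA ([], [], false)) =
      (if pvFinishTag (inner.foldl pvStepA ([], [], false)).2.1 ≠ [] then
        (inner.foldl pvStepA ([], [], false)).1 ++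
          [pvFinishTag (inner.foldl pvStepA ([], [], false)).2.1]
      else (inner.foldl pvStepA ([], [], false)).1) from rfl] at hA
  rw [hA, List.nil_append, pvPh_nil _ (pvFsp_ne_nil _ _)]
  have hB : (PySem.List.enumerate (PySem.Chars.splitOn inner ['"'])).foldl pvStepB [[]] =
      pvFsp false inner := by
    rw [show ([[]] : List (List Char)) = [] ++ [[]] from rfl, pvFoldB,
      show ((0 : Int) % 2 == 0) = true from rfl, pvSplitOn_eq,
      show pvSc '"' inner = pvPh [] (pvSc '"' inner) from
        (pvPh_nil _ (pvSc_ne_nil _ _)).symm,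
      (pvCrux inner [] [] []).1, List.nil_append,
      show pvSc ',' [] = [[]] from rfl, show pvPh [] [[]] = [[] ++ []] from rfl]
    simp only [List.append_nil]
    rw [show pvGraft [[]] (pvFsp false inner) = pvPh [] (pvFsp false inner) from rfl,
      pvPh_nil _ (pvFsp_ne_nil _ _)]
  rw [hB, List.map_congr_left (fun f hf => pvFin_eq_strip f (pvFsp_no_quote inner false f hf))]

-- ===== VERDICT (by name: the statement is the Claim_ definition above) =====
theorem clean_pg_array_tags_spec : Claim_equal_clean_pg_array_tags := by
  intro value _
  unfold Spec_clean_pg_array_tags clean_pg_array_tags clean_pg_array_tags_alt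
  dsimp only
  by_cases h1 : value.toList = [] ∨ PySem.Chars.strip value.toList = ['{', '}']
  · rw [if_pos h1, if_pos h1]
  · rw [if_neg h1, if_neg h1, pvCore]
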